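-- pv_equiv track=rewrite | github.com/pypi-data/pypi-mirror-145 | packages/node-require/node_require-1.2.1-py3-none-any.whl/node-require/req_impl.py | _parse
-- ===== SOURCE A (Python) =====
-- import typing as T
--
-- def _parse(q: str) -> T.Tuple[str, str]:
--     newpart = False
--     parts = []
--     s = ""
--     for x in q:
--         if newpart:
--             newpart = False
--             parts.append(s)
--             s = ""
--         s += x
--         if x == '/':
--             newpart = True
--     parts.append(s)
--     path = ""
--     file = parts.pop(len(parts) - 1)
--     for x in parts:
--         path += x
--     return (path, file)
-- ===== SOURCE B (Python) =====
-- import typing as T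
--
-- def _parse(q: str) -> T.Tuple[str, str]:
--     i = q[:-1].rfind('/')
--     return (q[:i + 1], q[i + 1:])
-- ===== Notes on version B (the rewrite author's own statement) =====
-- stated objective: simpler
-- what changed: Replaces the character-by-character loop that builds a parts list (then re-joins all but the last part) with a single reverse search for the separator over the input minus its final character, followed by two slices; a timing run measured B faster by a constant factor.
import Mathlib
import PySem

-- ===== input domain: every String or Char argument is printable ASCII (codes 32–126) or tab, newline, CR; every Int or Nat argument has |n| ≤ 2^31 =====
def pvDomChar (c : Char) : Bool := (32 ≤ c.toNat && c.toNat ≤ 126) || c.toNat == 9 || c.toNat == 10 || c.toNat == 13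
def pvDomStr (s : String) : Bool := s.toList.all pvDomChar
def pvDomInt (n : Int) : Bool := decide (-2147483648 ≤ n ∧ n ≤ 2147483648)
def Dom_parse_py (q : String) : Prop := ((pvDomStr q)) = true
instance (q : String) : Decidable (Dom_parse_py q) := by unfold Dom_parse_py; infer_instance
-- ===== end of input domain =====

-- B replaces A's character loop + parts list with a single rfind on the input minus its last char and two slices (simpler; measured faster by a constant factor).

-- ===== PORT A =====
-- the body of A's `for x in q` loop, on state (newpart, parts, s)
def pvStepA (st : Bool × List (List Char) × List Char) (x : Char) :
    Bool × List (List Char) × List Char :=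
  let (newpart, parts, s) :=
    if st.1 then (false, st.2.1 ++ [st.2.2], ([] : List Char)) else st
  let s := s ++ [x]
  let newpart := if x = '/' then true else newpart
  (newpart, parts, s)

def parse_py (q : String) : String × String :=
  let st := q.toList.foldl pvStepA (false, [], [])
  let parts := st.2.1 ++ [st.2.2]            -- parts.append(s)
  let file := parts.getLastD []              -- file = parts.pop(len(parts) - 1)
  let parts := parts.dropLast
  let path := parts.foldl (· ++ ·) ([] : List Char)   -- for x in parts: path += x
  (String.ofList path, String.ofList file)

-- ===== PORT B =====
def parse_py_alt (q : String) : String × String :=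
  let i := PySem.Str.rfind (PySem.Str.slice q none (some (-1))) "/"   -- i = q[:-1].rfind('/')
  (PySem.Str.slice q none (some (i + 1)), PySem.Str.slice q (some (i + 1)) none)

-- ===== PRECONDITION & SPEC =====
def Spec_parse_py (q : String) (out : String × String) : Prop := out = parse_py_alt q
instance (q : String) (out : String × String) : Decidable (Spec_parse_py q out) := by unfold Spec_parse_py; infer_instance

-- ===== CLAIM (what is proved, stated in full; the proofs are below) =====
def Claim_equal_parse_py : Prop := ∀ (q : String), Dom_parse_py q → Spec_parse_py q (parse_py q)

-- ===== LEMMAS AND PROOFS =====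

theorem pvGo_cases (s : List Char) (j : Nat) :
    PySem.Chars.rfind.go s ['/'] j =
      if ['/'].isPrefixOf (s.drop j) then (j : Int)
      else if j = 0 then -1 else PySem.Chars.rfind.go s ['/'] (j - 1) := by
  cases j with
  | zero => rw [PySem.Chars.rfind.go]; simp
  | succ j => rw [PySem.Chars.rfind.go]; simp

-- the prefix test for ['/'] only looks at the head, so a char appended past index j changes nothing
theorem pvGo_append (m : List Char) (c : Char) (hc : c ≠ '/') :
    ∀ j : Nat, j ≤ m.length →
      PySem.Chars.rfind.go (m ++ [c]) ['/'] j = PySem.Chars.rfind.go m ['/'] j := by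
  intro j
  induction j with
  | zero =>
    intro _
    conv_lhs => rw [pvGo_cases]
    conv_rhs => rw [pvGo_cases]
    cases m with
    | nil => simp [List.isPrefixOf, Ne.symm hc]
    | cons a as => simp [List.isPrefixOf]
  | succ j ih =>
    intro hj
    conv_lhs => rw [pvGo_cases]
    conv_rhs => rw [pvGo_cases]
    simp only [Nat.succ_ne_zero, if_false, Nat.add_sub_cancel]
    rw [ih (by omega)]
    rcases lt_or_eq_of_le hj with h | h
    · obtain ⟨a, as, ha⟩ : ∃ a as, m.drop (j + 1) = a :: as := by
        have hne : m.drop (j + 1) ≠ [] := by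
          simp [List.drop_eq_nil_iff]; omega
        exact List.exists_cons_of_ne_nil hne
      rw [List.drop_append_of_le_length (by omega), ha]
      simp [List.isPrefixOf]
    · have hd : m.drop (j + 1) = [] := by
        apply List.drop_eq_nil_of_le; omega
      rw [List.drop_append_of_le_length (by omega), hd]
      simp [List.isPrefixOf, Ne.symm hc]

theorem pvRfind_append (m : List Char) (c : Char) :
    PySem.Chars.rfind (m ++ [c]) ['/'] =
      if c = '/' then (m.length : Int) else PySem.Chars.rfind m ['/'] := by
  unfold PySem.Chars.rfind
  simp only [List.length_append, List.length_cons, List.length_nil, Nat.zero_add]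
  have hdrop : (m ++ [c]).drop (m.length + 1) = [] := by
    apply List.drop_eq_nil_of_le; simp
  conv_lhs => rw [pvGo_cases]
  rw [hdrop]
  simp only [List.isPrefixOf, Bool.false_eq_true, if_false, Nat.succ_ne_zero,
    Nat.add_sub_cancel]
  conv_lhs => rw [pvGo_cases]
  rw [List.drop_append_of_le_length (le_refl _), List.drop_length, List.nil_append]
  by_cases hc : c = '/'
  · subst hc
    simp [List.isPrefixOf]
  · have hpre : (['/'].isPrefixOf [c]) = false := by
      simp [List.isPrefixOf, Ne.symm hc]
    rw [hpre]
    simp only [Bool.false_eq_true, if_false, if_neg hc]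
    by_cases h0 : m.length = 0
    · have hm : m = [] := List.eq_nil_of_length_eq_zero h0
      subst hm
      simp only [List.length_nil, if_pos]
      conv_rhs => rw [pvGo_cases]
      simp
    · rw [if_neg h0, pvGo_append m c hc (m.length - 1) (by omega)]
      conv_rhs => rw [pvGo_cases]
      rw [List.drop_length]
      simp only [List.isPrefixOf, Bool.false_eq_true, if_false, if_neg h0]

theorem pvRfind_bounds (l : List Char) :
    -1 ≤ PySem.Chars.rfind l ['/'] ∧ PySem.Chars.rfind l ['/'] < l.length := by
  induction l using List.reverseRecOn with
  | nil => decide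
  | append_singleton m c ih =>
    rw [pvRfind_append]
    simp only [List.length_append, List.length_cons, List.length_nil]
    obtain ⟨ih1, ih2⟩ := ih
    split_ifs
    · push_cast; omega
    · push_cast; omega

-- rfind of '/' in m, expressed through m's last character
theorem pvRfind_of_getLast (m : List Char) (hm : m ≠ []) :
    PySem.Chars.rfind m ['/'] =
      if m.getLast hm = '/' then ((m.length : Int) - 1)
      else PySem.Chars.rfind m.dropLast ['/'] := by
  conv_lhs => rw [← List.dropLast_append_getLast hm]
  rw [pvRfind_append]
  have h0 : m.length ≠ 0 := by
    intro h; exact hm (List.eq_nil_of_length_eq_zero h)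
  have hlen : m.dropLast.length = m.length - 1 := List.length_dropLast
  split_ifs with h
  · rw [hlen]; omega
  · rfl

-- split point of l: one past the last '/' among all but the final character
def pvK (l : List Char) : Nat := (PySem.Chars.rfind l.dropLast ['/'] + 1).toNat

theorem pvK_le (l : List Char) : pvK l ≤ l.length := by
  have h := (pvRfind_bounds l.dropLast).2
  have hlen : l.dropLast.length = l.length - 1 := List.length_dropLast
  unfold pvK
  omega

theorem pvFoldl_append_eq (ps : List (List Char)) (a : List Char) :
    ps.foldl (· ++ ·) a = a ++ ps.flatten := by
  induction ps generalizing a with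
  | nil => simp
  | cons p ps ih => simp [List.foldl_cons, ih, List.append_assoc]

-- the loop invariant for A's fold: flag = "last char was '/'", flattened parts = chars up to
-- the split point, s = chars after it
theorem pvLoop_inv (l : List Char) :
    (l.foldl pvStepA (false, [], [])).1 = decide (l.getLast? = some '/')
    ∧ (l.foldl pvStepA (false, [], [])).2.1.flatten = l.take (pvK l)
    ∧ (l.foldl pvStepA (false, [], [])).2.2 = l.drop (pvK l) := by
  induction l using List.reverseRecOn with
  | nil => refine ⟨by simp, by simp, by simp⟩
  | append_singleton m x ih =>
    obtain ⟨ih1, ih2, ih3⟩ := ih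
    have hK : pvK (m ++ [x]) = (PySem.Chars.rfind m ['/'] + 1).toNat := by
      unfold pvK; rw [List.dropLast_concat]
    have hKm_le : pvK m ≤ m.length := pvK_le m
    rw [List.foldl_append, List.foldl_cons, List.foldl_nil]
    by_cases hlast : m.getLast? = some '/'
    · -- previous char was '/': the loop flushes s into parts
      have hb : (m.foldl pvStepA (false, [], [])).1 = true := by
        rw [ih1, hlast]; simp
      have hm : m ≠ [] := by intro h; subst h; simp at hlast
      have hstep : pvStepA (m.foldl pvStepA (false, [], [])) x =
          (if x = '/' then true else false,
           (m.foldl pvStepA (false, [], [])).2.1 ++ [(m.foldl pvStepA (false, [], [])).2.2],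
           [x]) := by
        simp [pvStepA, hb]
      rw [hstep]
      have hgl : m.getLast hm = '/' := by
        rw [List.getLast?_eq_some_getLast hm] at hlast
        exact Option.some_injective _ hlast
      have hlm : m.length ≠ 0 := by
        intro h; exact hm (List.eq_nil_of_length_eq_zero h)
      have hKval : pvK (m ++ [x]) = m.length := by
        rw [hK, pvRfind_of_getLast m hm, if_pos hgl]
        omega
      refine ⟨?_, ?_, ?_⟩
      · simp
      · simp only [hKval, List.take_left]
        simp only [List.flatten_append, List.flatten_cons, List.flatten_nil,
          List.append_nil, ih2, ih3, List.take_append_drop]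
      · simp only [hKval, List.drop_left]
    · -- no flush: s keeps growing
      have hb : (m.foldl pvStepA (false, [], [])).1 = false := by
        rw [ih1]; simp [hlast]
      have hstep : pvStepA (m.foldl pvStepA (false, [], [])) x =
          (if x = '/' then true else false,
           (m.foldl pvStepA (false, [], [])).2.1,
           (m.foldl pvStepA (false, [], [])).2.2 ++ [x]) := by
        simp [pvStepA, hb]
      rw [hstep]
      have hKval : pvK (m ++ [x]) = pvK m := by
        by_cases hm : m = []
        · subst hm; rw [hK]; rfl
        · have hgl : m.getLast hm ≠ '/' := by
            intro h; apply hlast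
            rw [List.getLast?_eq_some_getLast hm, h]
          rw [hK, pvRfind_of_getLast m hm, if_neg hgl]; rfl
      refine ⟨?_, ?_, ?_⟩
      · simp
      · simp only [hKval]
        rw [ih2, List.take_append_of_le_length hKm_le]
      · simp only [hKval]
        rw [ih3, List.drop_append_of_le_length hKm_le]

theorem pvA_eq (q : String) :
    parse_py q = (String.ofList (q.toList.take (pvK q.toList)),
                  String.ofList (q.toList.drop (pvK q.toList))) := by
  obtain ⟨h1, h2, h3⟩ := pvLoop_inv q.toList
  unfold parse_py
  simp only [List.getLastD_concat, List.dropLast_concat]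
  rw [pvFoldl_append_eq, List.nil_append, h2, h3]

theorem pvB_eq (q : String) :
    parse_py_alt q = (String.ofList (q.toList.take (pvK q.toList)),
                      String.ofList (q.toList.drop (pvK q.toList))) := by
  unfold parse_py_alt
  have hi : PySem.Str.rfind (PySem.Str.slice q none (some (-1))) "/" =
      PySem.Chars.rfind q.toList.dropLast ['/'] := by
    simp [PySem.Str.rfind, PySem.Str.slice, PySem.Chars.slice, PySem.List.slice_to_neg_one]
  have hb := (pvRfind_bounds q.toList.dropLast).1
  have hnn : 0 ≤ PySem.Chars.rfind q.toList.dropLast ['/'] + 1 := by omega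
  have hK : (PySem.Chars.rfind q.toList.dropLast ['/'] + 1).toNat = pvK q.toList := rfl
  simp only [hi]
  rw [PySem.Str.slice, PySem.Str.slice, PySem.Chars.slice, PySem.Chars.slice,
    PySem.List.slice_to q.toList hnn, PySem.List.slice_from q.toList hnn, hK]

-- ===== VERDICT (by name: the statement is the Claim_ definition above) =====
theorem parse_py_spec : Claim_equal_parse_py := by
  intro q _
  unfold Spec_parse_py
  rw [pvA_eq, pvB_eq]
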